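-- pv_equiv track=rewrite | github.com/Dormailler/Algorithm | 프로그래머스/2/181188. 요격 시스템/요격 시스템.py | solution
-- ===== SOURCE A (Python) =====
-- def solution(targets):
--     answer = 0
--     targets.sort(key=lambda x :(x[0],x[1]))
--     k1 = -1
--     k2 = -1
--
--     for i in targets:
--         if i[0] > k2:
--             k1 = i[0]
--             k2 = i[1] - 1
--             answer += 1
--         else:
--             k1 = max(k1,i[0])
--             k2 = min(k2,i[1]-1)
--     return answer
-- ===== SOURCE B (Python) =====
-- def _absorb(rest, d):
--     # drop the maximal prefix of targets already covered under deadline d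
--     while rest and rest[0][0] <= d:
--         c = rest[0][1] - 1
--         if c < d:
--             d = c
--         rest = rest[1:]
--     return rest
--
--
-- def solution(targets):
--     targets.sort(key=lambda x: (x[0], x[1]))  # same in-place sort as A
--     answer = 0
--     rest = _absorb(targets, -1)
--     while rest:
--         answer += 1
--         rest = _absorb(rest[1:], rest[0][1] - 1)
--     return answer
-- ===== Notes on version B (the rewrite author's own statement) =====
-- stated objective: alternative
-- what changed: Replaces A's single windowed scan carrying (answer,k1,k2) with a run-based decomposition: a helper that drops the maximal prefix of targets still coverable under the current deadline, and an outer loop that counts one shot per remaining run; the dead k1/window-intersection state is gone.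
import Mathlib
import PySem

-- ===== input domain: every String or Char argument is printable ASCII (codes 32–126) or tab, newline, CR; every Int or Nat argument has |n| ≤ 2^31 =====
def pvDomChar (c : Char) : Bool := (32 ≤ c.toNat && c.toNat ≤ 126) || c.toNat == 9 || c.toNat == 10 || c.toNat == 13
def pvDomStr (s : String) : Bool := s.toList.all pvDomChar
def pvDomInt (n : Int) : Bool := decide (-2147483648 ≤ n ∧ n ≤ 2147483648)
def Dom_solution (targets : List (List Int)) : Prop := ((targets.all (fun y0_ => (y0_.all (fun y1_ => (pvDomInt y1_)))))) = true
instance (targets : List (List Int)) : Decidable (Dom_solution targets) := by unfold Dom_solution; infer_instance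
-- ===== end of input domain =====

-- B restructures A's windowed greedy scan into a covered-prefix-absorbing helper plus a
-- run-counting loop (objective: alternative decomposition, no speed claim). Both A and B
-- sort `targets` in place with the same key, so the observable mutation is identical;
-- the equivalence proved here is about the return value.

-- ===== PORT A =====
def solution (targets : List (List Int)) : Int :=
  let ts := PySem.List.sorted2 targets (fun x => PySem.List.pyGetD x 0 0) (fun x => PySem.List.pyGetD x 1 0)
  (ts.foldl (fun st i =>
      if PySem.List.pyGetD i 0 0 > st.2.2 then
        (st.1 + 1, PySem.List.pyGetD i 0 0, PySem.List.pyGetD i 1 0 - 1)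
      else
        (st.1, max st.2.1 (PySem.List.pyGetD i 0 0), min st.2.2 (PySem.List.pyGetD i 1 0 - 1)))
    ((0 : Int), (-1 : Int), (-1 : Int))).1

-- ===== PORT B =====
def pvAbsorb (rest : List (List Int)) (d : Int) : List (List Int) :=
  match rest with
  | [] => []
  | x :: xs =>
    if PySem.List.pyGetD x 0 0 ≤ d then
      let c := PySem.List.pyGetD x 1 0 - 1
      pvAbsorb xs (if c < d then c else d)
    else x :: xs

-- length bound used by pvLoop's termination argument
theorem pvAbsorb_length_le (rest : List (List Int)) (d : Int) :
    (pvAbsorb rest d).length ≤ rest.length := by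
  induction rest generalizing d with
  | nil => simp [pvAbsorb]
  | cons x xs ih =>
    simp only [pvAbsorb]
    split
    · exact Nat.le_succ_of_le (ih _)
    · exact Nat.le_refl _

def pvLoop (rest : List (List Int)) : Int :=
  match rest with
  | [] => 0
  | x :: xs => 1 + pvLoop (pvAbsorb xs (PySem.List.pyGetD x 1 0 - 1))
termination_by rest.length
decreasing_by
  exact Nat.lt_succ_of_le (pvAbsorb_length_le _ _)

def solution_alt (targets : List (List Int)) : Int :=
  let ts := PySem.List.sorted2 targets (fun x => PySem.List.pyGetD x 0 0) (fun x => PySem.List.pyGetD x 1 0)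
  pvLoop (pvAbsorb ts (-1))

-- ===== PRECONDITION & SPEC =====
-- Pre_ excludes exactly the inputs on which the Python A raises IndexError:
-- some target sublist has fewer than two entries (x[0]/x[1] in the sort key or the loop).
def Pre_solution (targets : List (List Int)) : Prop := ∀ l ∈ targets, 2 ≤ l.length
instance (targets : List (List Int)) : Decidable (Pre_solution targets) := by unfold Pre_solution; infer_instance

def pvWitness_solution : List (List Int) := [[4, 5], [4, 8], [10, 14], [11, 13], [5, 12], [10, 12]]

def Spec_solution (targets : List (List Int)) (out : Int) : Prop := out = solution_alt targets
instance (targets : List (List Int)) (out : Int) : Decidable (Spec_solution targets out) := by unfold Spec_solution; infer_instance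

-- ===== CLAIM (what is proved, stated in full; the proofs are below) =====
def Claim_equal_solution : Prop := ∀ (targets : List (List Int)), Dom_solution targets → Pre_solution targets → Spec_solution targets (solution targets)

-- ===== LEMMAS AND PROOFS =====

-- A's windowed scan, started in state (ans, k1, k2), counts ans plus one per run that
-- B's absorb/loop pair extracts from the same list under deadline k2 (k1 is dead state).
theorem pvScan_eq_loop (xs : List (List Int)) :
    ∀ (ans k1 k2 : Int),
      (xs.foldl (fun st i =>
          if PySem.List.pyGetD i 0 0 > st.2.2 then
            (st.1 + 1, PySem.List.pyGetD i 0 0, PySem.List.pyGetD i 1 0 - 1)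
          else
            (st.1, max st.2.1 (PySem.List.pyGetD i 0 0), min st.2.2 (PySem.List.pyGetD i 1 0 - 1)))
        (ans, k1, k2)).1 = ans + pvLoop (pvAbsorb xs k2) := by
  induction xs with
  | nil => intro ans k1 k2; simp [pvAbsorb, pvLoop]
  | cons x xs ih =>
    intro ans k1 k2
    by_cases h : PySem.List.pyGetD x 0 0 > k2
    · have hne : ¬ PySem.List.pyGetD x 0 0 ≤ k2 := by omega
      simp only [List.foldl_cons, pvAbsorb, if_neg hne, if_pos h, pvLoop]
      rw [ih]
      ring
    · have hle : PySem.List.pyGetD x 0 0 ≤ k2 := by omega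
      simp only [List.foldl_cons, pvAbsorb, if_pos hle, if_neg h]
      rw [ih]
      have : (if PySem.List.pyGetD x 1 0 - 1 < k2 then PySem.List.pyGetD x 1 0 - 1 else k2)
          = min k2 (PySem.List.pyGetD x 1 0 - 1) := by
        simp only [Int.min_def]; split <;> split <;> omega
      rw [this]

-- ===== VERDICT (by name: the statement is the Claim_ definition above) =====
theorem solution_spec : Claim_equal_solution := by
  intro targets _ _
  unfold Spec_solution solution solution_alt
  simpa using pvScan_eq_loop _ 0 (-1) (-1)
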